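-- pv_equiv track=rewrite | github.com/Hojott/tira | vko9/oddlist.py | valid_permutation
-- ===== SOURCE A (Python) =====
-- def valid_permutation(permutation, x):
--     if permutation[0] != x:
--         return False
--     sums = set()
--
--     for i, right in enumerate(permutation[1:]):
--         left = permutation[i] # pretty ugly but works
--         if left + right in sums:
--             return False
--         sums.add(left+right)
--
--     return True
-- ===== SOURCE B (Python) =====
-- def valid_permutation(permutation, x):
--     if permutation[0] != x:
--         return False
--     sums = sorted(a + b for a, b in zip(permutation, permutation[1:]))
--     return all(s != t for s, t in zip(sums, sums[1:]))
-- ===== Notes on version B (the rewrite author's own statement) =====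
-- stated objective: alternative
-- what changed: Replaces the incremental seen-set with early return and permutation[i] indexing by a zip-built list of consecutive sums that is sorted once and scanned for an adjacent equal pair.
import Mathlib
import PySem

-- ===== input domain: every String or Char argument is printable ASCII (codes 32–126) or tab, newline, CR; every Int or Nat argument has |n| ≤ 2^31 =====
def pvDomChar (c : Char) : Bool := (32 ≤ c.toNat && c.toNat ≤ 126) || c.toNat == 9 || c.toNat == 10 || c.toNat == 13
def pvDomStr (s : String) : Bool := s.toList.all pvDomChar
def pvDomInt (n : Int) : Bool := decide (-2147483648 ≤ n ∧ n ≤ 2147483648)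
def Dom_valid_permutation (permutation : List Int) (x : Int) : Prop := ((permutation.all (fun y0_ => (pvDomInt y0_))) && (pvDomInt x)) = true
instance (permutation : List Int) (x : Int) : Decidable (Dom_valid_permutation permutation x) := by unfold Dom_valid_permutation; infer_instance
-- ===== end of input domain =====

-- B replaces A's incremental seen-set (with early return and permutation[i] indexing)
-- by building the list of consecutive-pair sums with zip, sorting it once, and
-- scanning for an adjacent equal pair; same cost class, different algorithm.

-- ===== PORT A =====
-- the for-loop over enumerate(permutation[1:]) with the growing set `sums`
def pvALoop (p : List Int) : List (Int × Int) → PySem.Set Int → Bool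
  | [], _ => true
  | (i, right) :: t, seen =>
    let left := PySem.List.pyGetD p i 0   -- permutation[i]; i is always in range here
    if PySem.Set.contains seen (left + right) then false
    else pvALoop p t (PySem.Set.add seen (left + right))

def valid_permutation (permutation : List Int) (x : Int) : Bool :=
  match permutation with
  | [] => false   -- Python raises IndexError on permutation[0]; excluded by Pre_
  | p0 :: rest =>
    if p0 != x then false
    else pvALoop permutation (PySem.List.enumerate rest 0) PySem.Set.empty

-- ===== PORT B =====
def valid_permutation_alt (permutation : List Int) (x : Int) : Bool :=
  match permutation with
  | [] => false   -- Python raises IndexError on permutation[0]; excluded by Pre_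
  | p0 :: rest =>
    if p0 != x then false
    else
      let sums := PySem.List.sorted ((permutation.zip rest).map (fun ab => ab.1 + ab.2)) (fun s => s) false
      (sums.zip (sums.drop 1)).all (fun st => st.1 != st.2)   -- sums[1:] is sums.drop 1

-- ===== PRECONDITION & SPEC =====
-- Pre_ excludes only the empty list, on which the Python A (and B) raise IndexError at permutation[0].
def Pre_valid_permutation (permutation : List Int) (x : Int) : Prop := permutation ≠ []
instance (permutation : List Int) (x : Int) : Decidable (Pre_valid_permutation permutation x) := by unfold Pre_valid_permutation; infer_instance
def pvWitness_valid_permutation : List Int × Int := ([1, 2, 3], 1)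

def Spec_valid_permutation (permutation : List Int) (x : Int) (out : Bool) : Prop := out = valid_permutation_alt permutation x
instance (permutation : List Int) (x : Int) (out : Bool) : Decidable (Spec_valid_permutation permutation x out) := by unfold Spec_valid_permutation; infer_instance

-- ===== CLAIM (what is proved, stated in full; the proofs are below) =====
def Claim_equal_valid_permutation : Prop := ∀ (permutation : List Int) (x : Int), Dom_valid_permutation permutation x → Pre_valid_permutation permutation x → Spec_valid_permutation permutation x (valid_permutation permutation x)

-- ===== LEMMAS AND PROOFS =====

-- the seen-set scan, with the left/right bookkeeping of A already resolved to the list of sums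
def pvScan : List Int → PySem.Set Int → Bool
  | [], _ => true
  | s :: t, seen =>
    if PySem.Set.contains seen s then false
    else pvScan t (PySem.Set.add seen s)

lemma pvALoop_eq_pvScan (rest : List Int) : ∀ (k : Nat) (p : List Int) (seen : PySem.Set Int),
    k + rest.length ≤ p.length →
    pvALoop p (PySem.List.enumerate rest (k : Int)) seen
      = pvScan (((p.drop k).zip rest).map (fun ab => ab.1 + ab.2)) seen := by
  induction rest with
  | nil => intro k p seen _; simp [PySem.List.enumerate_nil, pvALoop, pvScan]
  | cons r t ih =>
    intro k p seen h
    have hk : k < p.length := by simp at h; omega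
    rw [PySem.List.enumerate_cons]
    have hget : PySem.List.pyGetD p (k : Int) 0 = p[k] := by
      rw [PySem.List.pyGetD_natCast]; simp [List.getD_eq_getElem?_getD, hk]
    have hdrop : p.drop k = p[k] :: p.drop (k + 1) := List.drop_eq_getElem_cons hk
    rw [hdrop]
    simp only [pvALoop, hget, List.zip_cons_cons, List.map_cons, pvScan]
    split
    · rfl
    · have : ((k : Int) + 1) = ((k + 1 : Nat) : Int) := by push_cast; ring
      rw [this, ih (k + 1) p _ (by simp at h ⊢; omega)]

lemma pvScan_iff (l : List Int) : ∀ (seen : PySem.Set Int),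
    pvScan l seen = true ↔ l.Nodup ∧ ∀ s ∈ l, s ∉ seen := by
  induction l with
  | nil => intro seen; simp [pvScan]
  | cons s t ih =>
    intro seen
    by_cases hmem : s ∈ seen
    · have hs : PySem.Set.contains seen s = true := by
        simpa [PySem.Set.contains] using hmem
      rw [pvScan, if_pos hs]
      constructor
      · intro h; exact absurd h (by simp)
      · rintro ⟨_, hall⟩
        exact absurd hmem (hall s (List.mem_cons_self))
    · have hs : ¬ (PySem.Set.contains seen s = true) := by
        simpa [PySem.Set.contains] using hmem
      rw [pvScan, if_neg hs, ih]
      simp only [List.nodup_cons, List.mem_cons]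
      constructor
      · rintro ⟨hnd, hall⟩
        have hst : s ∉ t := fun hin => by
          have := hall s hin
          rw [PySem.Set.mem_add] at this
          exact this (Or.inr rfl)
        refine ⟨⟨hst, hnd⟩, ?_⟩
        rintro y (rfl | hy)
        · exact hmem
        · intro hysn
          exact (hall y hy) (by rw [PySem.Set.mem_add]; exact Or.inl hysn)
      · rintro ⟨⟨hst, hnd⟩, hall⟩
        refine ⟨hnd, fun y hy => ?_⟩
        rw [PySem.Set.mem_add]
        rintro (hysn | rfl)
        · exact hall y (Or.inr hy) hysn
        · exact hst hy

lemma pvChain_ne (t : List Int) :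
    ((t.zip (t.drop 1)).all (fun st => st.1 != st.2)) = true ↔ t.IsChain (· ≠ ·) := by
  induction t with
  | nil => simp
  | cons a t ih =>
    cases t with
    | nil => simp
    | cons b r =>
      rw [List.isChain_cons_cons]
      simp only [List.drop_one, List.tail_cons, List.zip_cons_cons, List.all_cons,
        Bool.and_eq_true, bne_iff_ne]
      simp only [List.drop_one, List.tail_cons] at ih
      exact and_congr Iff.rfl ih

lemma pvSorted_chain_iff_nodup (l : List Int) :
    ((PySem.List.sorted l (fun s => s) false).IsChain (· ≠ ·)) ↔ l.Nodup := by
  have hperm : (PySem.List.sorted l (fun s => s) false).Perm l :=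
    PySem.List.sorted_perm l (fun s => s) false
  have hle : (PySem.List.sorted l (fun s => s) false).Pairwise (· ≤ ·) := by
    have := PySem.List.sorted_pairwise l (fun s => s)
    simpa using this
  rw [← hperm.nodup_iff]
  set t := PySem.List.sorted l (fun s => s) false with ht
  clear_value t
  clear ht hperm
  constructor
  · intro hch
    have hchle : t.IsChain (· ≤ ·) := hle.isChain
    have hlt : t.IsChain (· < ·) := by
      clear hle
      induction t with
      | nil => exact List.isChain_nil
      | cons a t iht =>
        cases t with
        | nil => exact List.isChain_singleton a
        | cons b r =>
          rw [List.isChain_cons_cons] at hch hchle ⊢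
          exact ⟨lt_of_le_of_ne hchle.1 hch.1, iht hch.2 hchle.2⟩
    have := (List.isChain_iff_pairwise).mp hlt
    exact this.imp ne_of_lt
  · intro hnd
    exact (hnd.isChain)

-- ===== VERDICT (by name: the statement is the Claim_ definition above) =====
theorem valid_permutation_spec : Claim_equal_valid_permutation := by
  intro permutation x _ hpre
  unfold Spec_valid_permutation
  match permutation with
  | [] => exact absurd rfl hpre
  | p0 :: rest =>
    unfold valid_permutation valid_permutation_alt
    by_cases hx : (p0 != x) = true
    · simp [hx]
    · simp only [hx, Bool.false_eq_true, if_false]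
      set sums := (((p0 :: rest).zip rest).map (fun ab => ab.1 + ab.2)) with hsums
      have hA : pvALoop (p0 :: rest) (PySem.List.enumerate rest 0) PySem.Set.empty
          = pvScan sums PySem.Set.empty := by
        have := pvALoop_eq_pvScan rest 0 (p0 :: rest) PySem.Set.empty (by simp)
        simpa using this
      rw [hA]
      rw [Bool.eq_iff_iff]
      rw [pvScan_iff]
      rw [pvChain_ne, pvSorted_chain_iff_nodup]
      simp [PySem.Set.empty]
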